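-- pv_equiv track=rewrite | github.com/raghureddy031/itp-w1-create-box | create_box/main.py | create_box_empty
-- ===== SOURCE A (Python) =====
-- def create_box_empty(height, width, character):
-- 	i = 0
-- 	j = 0
-- 	ch = ''
-- 	if width >= 3 and height >= 3:
-- 		for i in range(i, height):
-- 			for j in range(0, width):
-- 				if i == 0 or i == height-1:
-- 					ch = ch + character
-- 				else:
-- 					if j > 0 and j < (width-1):
-- 						ch = ch + ' '
-- 					else:
-- 						ch = ch + character
-- 			else:
-- 				ch = ch + '\n'
-- 		return ch
-- 	else:
-- 		return 'Enter correct details'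
-- ===== SOURCE B (Python) =====
-- def create_box_empty(height, width, character):
--     if width >= 3 and height >= 3:
--         top = character * width
--         mid = character + ' ' * (width - 2) + character
--         rows = [top] + [mid] * (height - 2) + [top]
--         return ''.join(row + '\n' for row in rows)
--     return 'Enter correct details'
-- ===== Notes on version B (the rewrite author's own statement) =====
-- stated objective: simpler
-- what changed: Replaces the nested char-by-char accumulation loops with closed-form row construction (character*width, character+' '*(width-2)+character) and a single join of the row list.
import Mathlib
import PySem

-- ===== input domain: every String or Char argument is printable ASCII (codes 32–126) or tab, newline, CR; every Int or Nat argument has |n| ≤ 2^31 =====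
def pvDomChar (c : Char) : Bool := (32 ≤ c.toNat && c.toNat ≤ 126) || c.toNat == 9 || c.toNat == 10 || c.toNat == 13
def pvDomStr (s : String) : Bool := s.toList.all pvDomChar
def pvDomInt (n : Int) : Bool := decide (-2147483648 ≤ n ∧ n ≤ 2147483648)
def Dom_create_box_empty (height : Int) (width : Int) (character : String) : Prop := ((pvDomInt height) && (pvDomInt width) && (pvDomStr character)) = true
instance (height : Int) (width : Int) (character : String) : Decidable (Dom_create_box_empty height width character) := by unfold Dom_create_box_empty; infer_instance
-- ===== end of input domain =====

-- B builds each row as a closed-form string expression and joins the row list,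
-- instead of A's nested char-by-char accumulation loops (objective: simpler).

-- ===== PORT A =====
-- literal transliteration: nested for-loops over range, accumulating into ch;
-- the for-else '\n' append runs after each inner loop (no break occurs).
def create_box_empty (height : Int) (width : Int) (character : String) : String :=
  if width ≥ 3 ∧ height ≥ 3 then
    (PySem.List.pyRange 0 height 1).foldl (fun ch i =>
      ((PySem.List.pyRange 0 width 1).foldl (fun ch j =>
        if i = 0 ∨ i = height - 1 then ch ++ character
        else if j > 0 ∧ j < width - 1 then ch ++ " "
        else ch ++ character) ch) ++ "\n") ""
  else "Enter correct details"

-- ===== PORT B =====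
-- Python 's * n' (string repetition; empty for n ≤ 0)
def pyStrMul (s : String) (n : Int) : String :=
  String.join (List.replicate n.toNat s)

def create_box_empty_alt (height : Int) (width : Int) (character : String) : String :=
  if width ≥ 3 ∧ height ≥ 3 then
    let top := pyStrMul character width
    let mid := character ++ pyStrMul " " (width - 2) ++ character
    let rows := top :: (List.replicate (height - 2).toNat mid ++ [top])
    String.join (rows.map (· ++ "\n"))
  else "Enter correct details"

-- ===== PRECONDITION & SPEC =====
def Spec_create_box_empty (height : Int) (width : Int) (character : String) (out : String) : Prop := out = create_box_empty_alt height width character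
instance (height : Int) (width : Int) (character : String) (out : String) : Decidable (Spec_create_box_empty height width character out) := by unfold Spec_create_box_empty; infer_instance

-- ===== CLAIM (what is proved, stated in full; the proofs are below) =====
def Claim_equal_create_box_empty : Prop := ∀ (height : Int) (width : Int) (character : String), Dom_create_box_empty height width character → Spec_create_box_empty height width character (create_box_empty height width character)

-- ===== LEMMAS AND PROOFS =====

-- accumulating string fold = init ++ join of the mapped pieces
theorem sfoldl_append (l : List String) (s : String) :
    l.foldl (· ++ ·) s = s ++ l.foldl (· ++ ·) "" := by
  induction l generalizing s with
  | nil => simp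
  | cons a t ih =>
      simp only [List.foldl_cons]
      rw [ih (s ++ a), ih ("" ++ a)]
      simp [String.append_assoc]

theorem sjoin_cons (a : String) (l : List String) :
    String.join (a :: l) = a ++ String.join l := by
  simp only [String.join, List.foldl_cons]
  rw [sfoldl_append l ("" ++ a)]
  simp

theorem foldl_str_append {α : Type} (l : List α) (f : α → String) (init : String) :
    l.foldl (fun s x => s ++ f x) init = init ++ String.join (l.map f) := by
  induction l generalizing init with
  | nil => simp [String.join]
  | cons a t ih =>
      simp only [List.foldl_cons, List.map_cons, ih, sjoin_cons]
      simp [String.append_assoc]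

theorem map_const_of_mem {α β : Type} (l : List α) (f : α → β) (b : β)
    (h : ∀ x ∈ l, f x = b) : l.map f = List.replicate l.length b := by
  induction l with
  | nil => simp
  | cons a t ih =>
      simp only [List.map_cons, List.length_cons, List.replicate_succ]
      exact by rw [h a (by simp), ih (fun x hx => h x (by simp [hx]))]

theorem create_box_empty_spec_aux : ∀ (height width : Int) (character : String),
    create_box_empty height width character = create_box_empty_alt height width character := by
  intro h w c
  unfold create_box_empty create_box_empty_alt
  by_cases hg : w ≥ 3 ∧ h ≥ 3
  · simp only [if_pos hg]
    obtain ⟨hw, hh⟩ := hg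
    -- the inner loop of A appends one full row
    have hrow : ∀ (i : Int) (ch : String),
        ((PySem.List.pyRange 0 w 1).foldl (fun ch j =>
          if i = 0 ∨ i = h - 1 then ch ++ c
          else if j > 0 ∧ j < w - 1 then ch ++ " "
          else ch ++ c) ch)
        = ch ++ (if i = 0 ∨ i = h - 1 then pyStrMul c w
                 else c ++ pyStrMul " " (w - 2) ++ c) := by
      intro i ch
      by_cases hi : i = 0 ∨ i = h - 1
      · simp only [if_pos hi]
        rw [foldl_str_append, pyStrMul,
            map_const_of_mem _ _ c (fun _ _ => rfl),
            PySem.List.length_pyRange_one]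
        norm_num
      · simp only [if_neg hi]
        rw [show (fun (ch : String) (j : Int) =>
            if j > 0 ∧ j < w - 1 then ch ++ " " else ch ++ c)
            = fun ch j => ch ++ (if j > 0 ∧ j < w - 1 then " " else c) from by
              funext ch j; split_ifs <;> rfl]
        rw [foldl_str_append]
        congr 1
        rw [PySem.List.pyRange_one_append 0 1 w (by omega) (by omega),
            PySem.List.pyRange_one_append 1 (w - 1) w (by omega) (by omega),
            show PySem.List.pyRange 0 1 1 = [0] from by
              rw [PySem.List.pyRange_one_cons (by omega), PySem.List.pyRange_one_eq_nil (by omega)],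
            show PySem.List.pyRange (w - 1) w 1 = [w - 1] from by
              rw [PySem.List.pyRange_one_cons (by omega), PySem.List.pyRange_one_eq_nil (by omega)]]
        simp only [List.map_append, List.map_cons, List.map_nil]
        rw [map_const_of_mem (PySem.List.pyRange 1 (w - 1) 1)
              (fun j => if j > 0 ∧ j < w - 1 then " " else c) " "
              (fun x hx => by
                rw [PySem.List.mem_pyRange_one] at hx
                simp only [if_pos (show x > 0 ∧ x < w - 1 by omega)]),
            PySem.List.length_pyRange_one]
        have h0 : ¬((0:Int) > 0 ∧ (0:Int) < w - 1) := by omega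
        have h1 : ¬(w - 1 > 0 ∧ w - 1 < w - 1) := by omega
        simp only [if_neg h0, if_neg h1, String.join, pyStrMul]
        simp [List.foldl_append, String.append_assoc]
        rw [show w.toNat - 1 - 1 = (w - 2).toNat from by omega, sfoldl_append]
        simp [String.append_assoc]
    -- rewrite the outer loop with the row lemma, then as a join of rows
    rw [show (fun ch i =>
        ((PySem.List.pyRange 0 w 1).foldl (fun ch j =>
          if i = 0 ∨ i = h - 1 then ch ++ c
          else if j > 0 ∧ j < w - 1 then ch ++ " "
          else ch ++ c) ch) ++ "\n")
        = fun ch i => ch ++ ((if i = 0 ∨ i = h - 1 then pyStrMul c w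
            else c ++ pyStrMul " " (w - 2) ++ c) ++ "\n") from by
          funext ch i; rw [hrow i ch, String.append_assoc]]
    rw [foldl_str_append]
    simp only [String.empty_append]
    congr 1
    -- the outer index list maps to the row list
    have hmap : (PySem.List.pyRange 0 h 1).map (fun i =>
        if i = 0 ∨ i = h - 1 then pyStrMul c w else c ++ pyStrMul " " (w - 2) ++ c)
        = pyStrMul c w :: (List.replicate (h - 2).toNat (c ++ pyStrMul " " (w - 2) ++ c)
            ++ [pyStrMul c w]) := by
      rw [PySem.List.pyRange_one_append 0 1 h (by omega) (by omega),
          PySem.List.pyRange_one_append 1 (h - 1) h (by omega) (by omega),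
          show PySem.List.pyRange 0 1 1 = [0] from by
            rw [PySem.List.pyRange_one_cons (by omega), PySem.List.pyRange_one_eq_nil (by omega)],
          show PySem.List.pyRange (h - 1) h 1 = [h - 1] from by
            rw [PySem.List.pyRange_one_cons (by omega), PySem.List.pyRange_one_eq_nil (by omega)]]
      simp only [List.map_append, List.map_cons, List.map_nil]
      rw [map_const_of_mem (PySem.List.pyRange 1 (h - 1) 1) _
            (c ++ pyStrMul " " (w - 2) ++ c)
            (fun x hx => by
              rw [PySem.List.mem_pyRange_one] at hx
              simp only [if_neg (show ¬(x = 0 ∨ x = h - 1) by omega)]),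
          PySem.List.length_pyRange_one]
      have e0 : ((0:Int) = 0 ∨ (0:Int) = h - 1) := Or.inl rfl
      have e1 : (h - 1 = 0 ∨ h - 1 = h - 1) := Or.inr rfl
      simp
      omega
    rw [show (fun i : Int =>
        (if i = 0 ∨ i = h - 1 then pyStrMul c w else c ++ pyStrMul " " (w - 2) ++ c) ++ "\n")
        = (fun x => x ++ "\n") ∘ (fun i : Int =>
            if i = 0 ∨ i = h - 1 then pyStrMul c w else c ++ pyStrMul " " (w - 2) ++ c)
        from rfl, ← List.map_map, hmap]
  · simp [if_neg hg]

-- ===== VERDICT (by name: the statement is the Claim_ definition above) =====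
theorem create_box_empty_spec : Claim_equal_create_box_empty := by
  intro h w c _
  exact create_box_empty_spec_aux h w c
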